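-- pv_equiv track=rewrite | github.com/junohpark221/Programmers_Coding_Interview_Questions | Level_3/합승_택시_요금.py | findClosedNode
-- ===== SOURCE A (Python) =====
-- def findClosedNode(visited, distance, n):
--     node=-1
--     small_dist=max(distance)+1
--     unlinked=[]
--
--     for i in range(n):
--         if visited[i]==0:
--             if distance[i]==-1:
--                 unlinked.append(i)
--             elif distance[i]<small_dist:
--                 node=i
--                 small_dist=distance[i]
--
--     if node!=-1:
--         return node
--     else:
--         if len(unlinked)==0:    return -1
--         else:   return unlinked[0]
-- ===== SOURCE B (Python) =====
-- def findClosedNode(visited, distance, n):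
--     cand = [i for i in range(n) if visited[i] == 0 and distance[i] != -1]
--     if cand:
--         m = min(distance[i] for i in cand)
--         return next(i for i in cand if distance[i] == m)
--     return next((i for i in range(n) if visited[i] == 0 and distance[i] == -1), -1)
-- ===== Notes on version B (the rewrite author's own statement) =====
-- stated objective: simpler
-- what changed: Replaces A's single accumulating loop (running minimum + side list of unlinked nodes) with two declarative passes: build the candidate list, take min of its distances and return the first index attaining it, otherwise return the first unlinked index; B also never calls max(distance).
-- outside the precondition, e.g. on findClosedNode([1, 1], [5], 2): A returns -1, B returns -1
import Mathlib
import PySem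

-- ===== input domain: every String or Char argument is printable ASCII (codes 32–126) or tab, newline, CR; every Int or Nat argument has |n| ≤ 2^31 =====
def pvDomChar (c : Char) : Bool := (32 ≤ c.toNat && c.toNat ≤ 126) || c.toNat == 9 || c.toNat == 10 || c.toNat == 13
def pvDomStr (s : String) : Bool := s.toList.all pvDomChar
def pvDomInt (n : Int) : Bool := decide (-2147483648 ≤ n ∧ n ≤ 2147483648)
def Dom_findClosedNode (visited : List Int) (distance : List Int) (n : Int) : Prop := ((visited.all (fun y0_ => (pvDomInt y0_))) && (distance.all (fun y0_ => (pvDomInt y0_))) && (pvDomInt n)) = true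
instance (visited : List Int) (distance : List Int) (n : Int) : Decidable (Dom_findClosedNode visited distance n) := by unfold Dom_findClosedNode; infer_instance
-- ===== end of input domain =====

-- B replaces A's single accumulating loop by two declarative passes (candidate list + min,
-- else first unlinked); objective: simpler. Return-value equivalence on Pre_ (A raises outside it).

-- ===== PORT A =====
def findClosedNode (visited : List Int) (distance : List Int) (n : Int) : Int :=
  let smallInit : Int := (PySem.List.max? distance (fun x => x)).getD 0 + 1
  let st :=
    (PySem.List.pyRange 0 n 1).foldl
      (fun (s : Int × Int × List Int) i =>
        if PySem.List.pyGetD visited i 0 == 0 then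
          if PySem.List.pyGetD distance i 0 == -1 then (s.1, s.2.1, s.2.2 ++ [i])
          else if PySem.List.pyGetD distance i 0 < s.2.1 then (i, PySem.List.pyGetD distance i 0, s.2.2)
          else s
        else s)
      (-1, smallInit, ([] : List Int))
  if st.1 ≠ -1 then st.1
  else
    match st.2.2 with
    | [] => -1
    | x :: _ => x

-- ===== PORT B =====
def findClosedNode_alt (visited : List Int) (distance : List Int) (n : Int) : Int :=
  let cand := (PySem.List.pyRange 0 n 1).filter
      (fun i => PySem.List.pyGetD visited i 0 == 0 && !(PySem.List.pyGetD distance i 0 == -1))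
  if !cand.isEmpty then
    let m := (PySem.List.min? (cand.map (fun i => PySem.List.pyGetD distance i 0)) (fun x => x)).getD 0
    (cand.find? (fun i => PySem.List.pyGetD distance i 0 == m)).getD (-1)
  else
    ((PySem.List.pyRange 0 n 1).find?
      (fun i => PySem.List.pyGetD visited i 0 == 0 && PySem.List.pyGetD distance i 0 == -1)).getD (-1)

-- ===== PRECONDITION & SPEC =====
-- Pre_ excludes the inputs on which A raises: max(distance) raises ValueError on an empty
-- distance, and visited[i]/distance[i] raise IndexError when n exceeds either length; the bound
-- n ≤ len(distance) also conservatively excludes the corner where every position beyond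
-- len(distance) is visited, so distance[i] is never read and A happens to return.
def Pre_findClosedNode (visited : List Int) (distance : List Int) (n : Int) : Prop :=
  distance ≠ [] ∧ n ≤ (visited.length : Int) ∧ n ≤ (distance.length : Int)
instance (visited : List Int) (distance : List Int) (n : Int) : Decidable (Pre_findClosedNode visited distance n) := by unfold Pre_findClosedNode; infer_instance

def pvWitness_findClosedNode : List Int × List Int × Int := ([0, 0], [3, -1], 2)

def Spec_findClosedNode (visited : List Int) (distance : List Int) (n : Int) (out : Int) : Prop := out = findClosedNode_alt visited distance n
instance (visited : List Int) (distance : List Int) (n : Int) (out : Int) : Decidable (Spec_findClosedNode visited distance n out) := by unfold Spec_findClosedNode; infer_instance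

-- ===== CLAIM (what is proved, stated in full; the proofs are below) =====
def Claim_equal_findClosedNode : Prop := ∀ (visited : List Int) (distance : List Int) (n : Int), Dom_findClosedNode visited distance n → Pre_findClosedNode visited distance n → Spec_findClosedNode visited distance n (findClosedNode visited distance n)
-- ===== LEMMAS AND PROOFS =====

-- A's running-minimum update, extracted as a recursion over the candidate (distance, index) pairs.
def pvRunmin : Int × Int → List (Int × Int) → Int × Int
  | s, [] => s
  | s, p :: c => if p.1 < s.2 then pvRunmin (p.2, p.1) c else pvRunmin s c

-- A's loop splits into the running minimum over the candidate pairs and the unlinked filter.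
lemma foldA_decomp (visited distance : List Int) (l : List Int) (node small : Int) (unl : List Int) :
    l.foldl
      (fun (s : Int × Int × List Int) i =>
        if PySem.List.pyGetD visited i 0 == 0 then
          if PySem.List.pyGetD distance i 0 == -1 then (s.1, s.2.1, s.2.2 ++ [i])
          else if PySem.List.pyGetD distance i 0 < s.2.1 then (i, PySem.List.pyGetD distance i 0, s.2.2)
          else s
        else s)
      (node, small, unl)
    = ((pvRunmin (node, small)
          ((l.filter (fun i => PySem.List.pyGetD visited i 0 == 0 && !(PySem.List.pyGetD distance i 0 == -1))).map
            (fun i => (PySem.List.pyGetD distance i 0, i)))).1,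
       (pvRunmin (node, small)
          ((l.filter (fun i => PySem.List.pyGetD visited i 0 == 0 && !(PySem.List.pyGetD distance i 0 == -1))).map
            (fun i => (PySem.List.pyGetD distance i 0, i)))).2,
       unl ++ l.filter (fun i => PySem.List.pyGetD visited i 0 == 0 && PySem.List.pyGetD distance i 0 == -1)) := by
  induction l generalizing node small unl with
  | nil => simp [pvRunmin]
  | cons i l ih =>
    simp only [List.foldl_cons, List.filter_cons]
    by_cases hv : (PySem.List.pyGetD visited i 0 == 0) = true
    · by_cases hd : (PySem.List.pyGetD distance i 0 == -1) = true
      · rw [if_pos hv, if_pos hd]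
        simp only [hv, hd, Bool.not_true, Bool.and_false, Bool.and_true, Bool.false_eq_true, if_false, if_true]
        rw [ih]
        simp [List.append_assoc]
      · by_cases hlt : PySem.List.pyGetD distance i 0 < small
        · rw [if_pos hv, if_neg hd, if_pos hlt]
          simp only [hv, Bool.true_and, eq_false_of_ne_true hd, Bool.not_false,
            if_true, Bool.false_eq_true, if_false, List.map_cons]
          rw [ih]
          simp [pvRunmin, hlt]
        · rw [if_pos hv, if_neg hd, if_neg hlt]
          simp only [hv, Bool.true_and, eq_false_of_ne_true hd, Bool.not_false,
            if_true, Bool.false_eq_true, if_false, List.map_cons]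
          rw [ih]
          simp [pvRunmin, hlt]
    · rw [if_neg hv]
      simp only [eq_false_of_ne_true hv, Bool.false_and, Bool.false_eq_true, if_false]
      rw [ih]

-- pvRunmin from a seed (i, d) returns the minimum distance and the first pair attaining it.
lemma pvRunmin_eq (c : List (Int × Int)) : ∀ (i d : Int),
    pvRunmin (i, d) c =
      (((((d, i) :: c).find? (fun p => p.1 == (c.map Prod.fst).foldl min d)).getD (0, 0)).2,
       (c.map Prod.fst).foldl min d) := by
  induction c with
  | nil => intro i d; simp [pvRunmin]
  | cons p c ih =>
    intro i d
    obtain ⟨d', i'⟩ := p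
    simp only [pvRunmin, List.map_cons, List.foldl_cons]
    by_cases h : d' < d
    · rw [if_pos h, ih i' d',
        show (c.map Prod.fst).foldl min (min d d') = (c.map Prod.fst).foldl min d' from by
          rw [min_eq_right h.le]]
      have hne : ¬ ((d : Int) == (c.map Prod.fst).foldl min d') = true := by
        have hle := (PySem.List.foldl_min_le (c.map Prod.fst) d').1
        simp only [beq_iff_eq]
        omega
      conv_rhs => rw [List.find?_cons_of_neg
        (p := fun q : Int × Int => q.1 == (c.map Prod.fst).foldl min d') hne]
    · rw [if_neg h, ih i d,
        show (c.map Prod.fst).foldl min (min d d') = (c.map Prod.fst).foldl min d from by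
          rw [min_eq_left (le_of_not_gt h)]]
      by_cases hdm : (d == (c.map Prod.fst).foldl min d) = true
      · rw [List.find?_cons_of_pos (by simpa using hdm), List.find?_cons_of_pos (by simpa using hdm)]
      · have hle := (PySem.List.foldl_min_le (c.map Prod.fst) d).1
        rw [List.find?_cons_of_neg (by simpa using hdm), List.find?_cons_of_neg (by simpa using hdm),
          List.find?_cons_of_neg (by
            simp only [beq_iff_eq] at hdm ⊢
            omega)]

-- first match of p in l, with default -1, equals the head of the filtered list (or -1)
lemma find?_getD_eq_filter_head (l : List Int) (p : Int → Bool) :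
    (l.find? p).getD (-1) = (match l.filter p with | [] => -1 | x :: _ => x) := by
  induction l with
  | nil => simp
  | cons x l ih =>
    by_cases hx : p x = true
    · simp [List.find?_cons_of_pos hx, hx]
    · rw [List.find?_cons_of_neg (by simp [hx]), List.filter_cons]
      simp only [hx, Bool.false_eq_true, if_false]
      exact ih

theorem findClosedNode_spec : Claim_equal_findClosedNode := by
  intro visited distance n _ hpre
  obtain ⟨hne, hnv, hnd⟩ := hpre
  unfold Spec_findClosedNode
  obtain ⟨M, hM⟩ : ∃ M, PySem.List.max? distance (fun x => x) = some M := by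
    cases hmx : PySem.List.max? distance (fun x => x) with
    | none => exact absurd ((PySem.List.max?_eq_none_iff distance (fun x => x)).1 hmx) hne
    | some M => exact ⟨M, rfl⟩
  have hball : ∀ i ∈ PySem.List.pyRange 0 n 1,
      PySem.List.pyGetD distance i 0 < (PySem.List.max? distance (fun x => x)).getD 0 + 1 := by
    intro i hi
    obtain ⟨h0, h1⟩ := PySem.List.mem_pyRange_one.1 hi
    have hmem : PySem.List.pyGetD distance i 0 ∈ distance :=
      PySem.List.pyGetD_mem distance 0 (by unfold PySem.Raise.InRange; omega)
    have hle := PySem.List.max?_isMax hM _ hmem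
    rw [hM]
    simp only [Option.getD_some]
    omega
  cases hc : (PySem.List.pyRange 0 n 1).filter
      (fun i => PySem.List.pyGetD visited i 0 == 0 && !(PySem.List.pyGetD distance i 0 == -1)) with
  | nil =>
    have hB : findClosedNode_alt visited distance n
        = ((PySem.List.pyRange 0 n 1).find?
            (fun i => PySem.List.pyGetD visited i 0 == 0 && PySem.List.pyGetD distance i 0 == -1)).getD (-1) := by
      simp [findClosedNode_alt, hc]
    rw [hB, find?_getD_eq_filter_head]
    simp only [findClosedNode]
    rw [foldA_decomp, hc]
    simp [pvRunmin]
  | cons i1 rest =>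
    have hi1R : i1 ∈ PySem.List.pyRange 0 n 1 :=
      List.mem_of_mem_filter (l := PySem.List.pyRange 0 n 1) (hc ▸ List.mem_cons_self ..)
    have hlt1 : PySem.List.pyGetD distance i1 0 < (PySem.List.max? distance (fun x => x)).getD 0 + 1 :=
      hball i1 hi1R
    have hmapfst : ((rest.map (fun i => (PySem.List.pyGetD distance i 0, i))).map Prod.fst)
        = rest.map (fun i => PySem.List.pyGetD distance i 0) := by
      simp [List.map_map, Function.comp]
    have hm12 : ((rest.map (fun i => (PySem.List.pyGetD distance i 0, i))).map Prod.fst).foldl min (PySem.List.pyGetD distance i1 0) = (rest.map (fun i => PySem.List.pyGetD distance i 0)).foldl min (PySem.List.pyGetD distance i1 0) := by rw [hmapfst]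
    have hatt : ∃ j ∈ i1 :: rest,
        (fun j => PySem.List.pyGetD distance j 0 == ((rest.map (fun i => (PySem.List.pyGetD distance i 0, i))).map Prod.fst).foldl min (PySem.List.pyGetD distance i1 0)) j = true := by
      rcases PySem.List.foldl_min_mem ((rest.map (fun i => (PySem.List.pyGetD distance i 0, i))).map Prod.fst)
          (PySem.List.pyGetD distance i1 0) with h | h
      · exact ⟨i1, List.mem_cons_self .., by simp only [beq_iff_eq]; exact h.symm⟩
      · rw [hmapfst] at h
        obtain ⟨j, hj, hjm⟩ := List.mem_map.1 h
        refine ⟨j, List.mem_cons_of_mem _ hj, ?_⟩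
        simp only [beq_iff_eq, hm12]
        exact hjm
    obtain ⟨j0, hj0⟩ : ∃ j0, ((i1 :: rest).find?
        (fun j => PySem.List.pyGetD distance j 0 == ((rest.map (fun i => (PySem.List.pyGetD distance i 0, i))).map Prod.fst).foldl min (PySem.List.pyGetD distance i1 0))) = some j0 :=
      Option.isSome_iff_exists.mp (List.find?_isSome.mpr hatt)
    have hj0c : ((i1 :: rest).find?
        ((fun p : Int × Int => p.1 == ((rest.map (fun i => (PySem.List.pyGetD distance i 0, i))).map Prod.fst).foldl min (PySem.List.pyGetD distance i1 0)) ∘ (fun i => (PySem.List.pyGetD distance i 0, i)))) = some j0 := hj0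
    have hfind : (((PySem.List.pyGetD distance i1 0, i1) ::
          rest.map (fun i => (PySem.List.pyGetD distance i 0, i))).find? (fun p => p.1 == ((rest.map (fun i => (PySem.List.pyGetD distance i 0, i))).map Prod.fst).foldl min (PySem.List.pyGetD distance i1 0)))
        = some (PySem.List.pyGetD distance j0 0, j0) := by
      rw [show ((PySem.List.pyGetD distance i1 0, i1) :: rest.map (fun i => (PySem.List.pyGetD distance i 0, i)))
          = (i1 :: rest).map (fun i => (PySem.List.pyGetD distance i 0, i)) from by simp]
      rw [List.find?_map, hj0c]
      rfl
    have hj0R : j0 ∈ PySem.List.pyRange 0 n 1 :=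
      List.mem_of_mem_filter (l := PySem.List.pyRange 0 n 1) (hc ▸ List.mem_of_find?_eq_some hj0)
    have hj0ne : ¬ (j0 = -1) := by
      have hj0nonneg : 0 ≤ j0 := (PySem.List.mem_pyRange_one.1 hj0R).1
      omega
    have hA : findClosedNode visited distance n = j0 := by
      simp only [findClosedNode]
      rw [foldA_decomp, hc]
      simp only [List.map_cons]
      rw [show pvRunmin (-1, (PySem.List.max? distance (fun x => x)).getD 0 + 1)
            ((PySem.List.pyGetD distance i1 0, i1) :: rest.map (fun i => (PySem.List.pyGetD distance i 0, i)))
          = pvRunmin (i1, PySem.List.pyGetD distance i1 0) (rest.map (fun i => (PySem.List.pyGetD distance i 0, i))) from by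
        simp [pvRunmin, hlt1]]
      rw [pvRunmin_eq, hfind]
      simp [hj0ne]
    have hB : findClosedNode_alt visited distance n = j0 := by
      simp only [findClosedNode_alt]
      rw [hc]
      simp only [List.isEmpty_cons, Bool.not_false, if_true, List.map_cons,
        PySem.List.min?_id_cons, Option.getD_some]
      rw [show (rest.map (fun i => PySem.List.pyGetD distance i 0)).foldl min (PySem.List.pyGetD distance i1 0) = ((rest.map (fun i => (PySem.List.pyGetD distance i 0, i))).map Prod.fst).foldl min (PySem.List.pyGetD distance i1 0) from hm12.symm, hj0]
      rfl
    rw [hA, hB]
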